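-- pv_equiv track=rewrite | github.com/lescobar/Test | test_print.py | base_pyramid
-- ===== SOURCE A (Python) =====
-- def base_pyramid(n:int) -> int:
--     num_asterix_factor:int = 2
--     num_asterix:int = 0
--     for i in range(1, n + 1):
--         if i == 1:
--             num_asterix = 1
--         else:
--             num_asterix = num_asterix + num_asterix_factor
--
--     return num_asterix
-- ===== SOURCE B (Python) =====
-- def base_pyramid(n: int) -> int:
--     # closed form: base row of an n-row pyramid has 2n-1 asterisks; 0 for n < 1
--     return 2 * n - 1 if n >= 1 else 0
-- ===== Notes on version B (the rewrite author's own statement) =====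
-- stated objective: faster
-- what changed: Replaced the O(n) accumulation loop with the closed form 2n-1 (0 for n<1).
import Mathlib
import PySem

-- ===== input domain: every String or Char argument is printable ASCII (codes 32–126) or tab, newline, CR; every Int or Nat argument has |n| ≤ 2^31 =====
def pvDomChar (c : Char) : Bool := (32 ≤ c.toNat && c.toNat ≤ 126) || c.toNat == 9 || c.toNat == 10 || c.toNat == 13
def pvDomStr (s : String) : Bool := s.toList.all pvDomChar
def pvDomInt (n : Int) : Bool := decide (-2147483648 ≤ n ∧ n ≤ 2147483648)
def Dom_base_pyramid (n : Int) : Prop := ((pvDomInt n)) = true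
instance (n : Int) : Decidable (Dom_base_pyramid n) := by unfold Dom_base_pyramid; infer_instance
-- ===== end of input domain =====

-- B replaces A's O(n) accumulation loop with the closed form 2n-1 (0 for n < 1): faster.


-- ===== PORT A =====
def base_pyramid (n : Int) : Int :=
  let num_asterix_factor : Int := 2
  (PySem.List.pyRange 1 (n + 1) 1).foldl
    (fun num_asterix i => if i == 1 then 1 else num_asterix + num_asterix_factor) 0

-- ===== PORT B =====
def base_pyramid_alt (n : Int) : Int :=
  if n ≥ 1 then 2 * n - 1 else 0

-- ===== PRECONDITION & SPEC =====
def Spec_base_pyramid (n : Int) (out : Int) : Prop := out = base_pyramid_alt n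
instance (n : Int) (out : Int) : Decidable (Spec_base_pyramid n out) := by unfold Spec_base_pyramid; infer_instance

-- ===== CLAIM (what is proved, stated in full; the proofs are below) =====
def Claim_equal_base_pyramid : Prop := ∀ (n : Int), Dom_base_pyramid n → Spec_base_pyramid n (base_pyramid n)

-- ===== LEMMAS AND PROOFS =====

-- the loop over range(1, k+1) yields 2*k-1 for k ≥ 1
theorem foldl_range_closed (k : Nat) (hk : 1 ≤ k) :
    (PySem.List.pyRange 1 (1 + (k : Int)) 1).foldl
      (fun num_asterix i => if i == 1 then 1 else num_asterix + 2) 0 = 2 * (k : Int) - 1 := by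
  induction k with
  | zero => omega
  | succ m ih =>
    rw [show (1 + ((m + 1 : ℕ) : Int)) = (1 + (m : Int)) + 1 by push_cast; ring]
    rw [PySem.List.pyRange_one_succ_right (by omega)]
    rw [List.foldl_append]
    rcases Nat.eq_zero_or_pos m with rfl | hm
    · simp [PySem.List.pyRange_one_eq_nil (a := 1) (b := 1) (by omega)]
    · rw [ih hm]
      have h1 : m ≠ 0 := by omega
      simp [h1]
      ring

-- ===== VERDICT (by name: the statement is the Claim_ definition above) =====
theorem base_pyramid_spec : Claim_equal_base_pyramid := by
  intro n _
  unfold Spec_base_pyramid base_pyramid base_pyramid_alt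
  simp only
  by_cases h : n ≤ 0
  · have : PySem.List.pyRange 1 (n + 1) 1 = [] := by
      unfold PySem.List.pyRange; simp; omega
    rw [this]; simp [List.foldl]; omega
  · have hn : ∃ m : ℕ, n = (m : Int) + 1 := ⟨(n - 1).toNat, by omega⟩
    obtain ⟨m, rfl⟩ := hn
    rw [show ((m : Int) + 1 + 1) = 1 + ((m + 1 : ℕ) : Int) by push_cast; ring]
    rw [foldl_range_closed (m + 1) (by omega)]
    simp
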